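-- pv_equiv track=rewrite | github.com/Kruzefiori/matricula_metaheuristica | src/modules/heuristic/refinement/refineByDisciplineAvailable.py | has_schedule_conflict
-- ===== SOURCE A (Python) =====
-- from typing import List, Dict, Set
--
-- def has_schedule_conflict(current_solution: List[str], new_disc: str, schedule_map: Dict) -> bool:
--     """Verifica se a nova disciplina tem conflito com as já selecionadas"""
--     for day, times in schedule_map.items():
--         for time, discs in times.items():
--             if new_disc in discs:
--                 # Verifica se alguma disciplina na solução está no mesmo horário
--                 for disc in current_solution:
--                     if disc in discs:
--                         return True
--     return False
-- ===== SOURCE B (Python) =====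
-- def has_schedule_conflict(current_solution, new_disc, schedule_map):
--     """Gather every discipline co-scheduled with new_disc, then intersect once."""
--     conflict = set()
--     for times in schedule_map.values():
--         for discs in times.values():
--             if new_disc in discs:
--                 conflict.update(discs)
--     return bool(conflict & set(current_solution))
-- ===== Notes on version B (the rewrite author's own statement) =====
-- stated objective: alternative
-- what changed: Replaces A's per-slot early-return triple loop (membership test of every current discipline inside each matching slot) by a gather-then-test decomposition: one full scan accumulates a co-occurrence set of all disciplines sharing a slot with new_disc, then a single set intersection with the current solution decides the result.
import Mathlib
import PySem

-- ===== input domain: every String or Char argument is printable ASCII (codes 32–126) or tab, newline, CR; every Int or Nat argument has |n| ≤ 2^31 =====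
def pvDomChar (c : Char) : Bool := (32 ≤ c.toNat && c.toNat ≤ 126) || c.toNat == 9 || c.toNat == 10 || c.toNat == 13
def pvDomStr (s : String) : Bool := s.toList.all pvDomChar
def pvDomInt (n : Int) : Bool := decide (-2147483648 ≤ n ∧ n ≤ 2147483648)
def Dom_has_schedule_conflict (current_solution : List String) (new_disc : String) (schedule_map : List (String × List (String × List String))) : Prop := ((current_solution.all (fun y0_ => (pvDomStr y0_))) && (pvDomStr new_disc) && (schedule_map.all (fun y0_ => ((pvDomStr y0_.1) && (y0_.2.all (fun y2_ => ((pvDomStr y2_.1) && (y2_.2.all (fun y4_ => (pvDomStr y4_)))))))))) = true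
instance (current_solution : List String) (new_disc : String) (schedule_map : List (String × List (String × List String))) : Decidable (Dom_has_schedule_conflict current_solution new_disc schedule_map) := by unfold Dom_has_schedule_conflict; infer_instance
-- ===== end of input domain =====

-- ===== PORT A =====
-- Port of A: nested scan; the early 'return True' is a Bool 'any' chain.
def has_schedule_conflict (current_solution : List String) (new_disc : String) (schedule_map : List (String × List (String × List String))) : Bool :=
  schedule_map.any (fun dt =>
    dt.2.any (fun td =>
      if td.2.contains new_disc then
        current_solution.any (fun disc => td.2.contains disc)
      else false))

-- ===== PORT B =====
-- Port of B: one full pass gathers the co-occurrence set, then one intersection.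
def hscGather (new_disc : String) (schedule_map : List (String × List (String × List String))) : PySem.Set String :=
  schedule_map.foldl (fun acc dt =>
    dt.2.foldl (fun acc2 td =>
      if td.2.contains new_disc then PySem.Set.update acc2 td.2 else acc2) acc)
    PySem.Set.empty

def has_schedule_conflict_alt (current_solution : List String) (new_disc : String) (schedule_map : List (String × List (String × List String))) : Bool :=
  !(PySem.Set.inter (hscGather new_disc schedule_map) (PySem.Set.ofList current_solution)).isEmpty

-- ===== PRECONDITION & SPEC =====
def Spec_has_schedule_conflict (current_solution : List String) (new_disc : String) (schedule_map : List (String × List (String × List String))) (out : Bool) : Prop := out = has_schedule_conflict_alt current_solution new_disc schedule_map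
instance (current_solution : List String) (new_disc : String) (schedule_map : List (String × List (String × List String))) (out : Bool) : Decidable (Spec_has_schedule_conflict current_solution new_disc schedule_map out) := by unfold Spec_has_schedule_conflict; infer_instance

-- ===== CLAIM (what is proved, stated in full; the proofs are below) =====
def Claim_equal_has_schedule_conflict : Prop := ∀ (current_solution : List String) (new_disc : String) (schedule_map : List (String × List (String × List String))), Dom_has_schedule_conflict current_solution new_disc schedule_map → Spec_has_schedule_conflict current_solution new_disc schedule_map (has_schedule_conflict current_solution new_disc schedule_map)

-- ===== LEMMAS AND PROOFS =====

lemma mem_gather_inner (nd : String) (ts : List (String × List String)) (acc : PySem.Set String) (x : String) :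
    x ∈ ts.foldl (fun acc2 td => if td.2.contains nd then PySem.Set.update acc2 td.2 else acc2) acc ↔
      x ∈ acc ∨ ∃ td ∈ ts, nd ∈ td.2 ∧ x ∈ td.2 := by
  induction ts generalizing acc with
  | nil => simp
  | cons h t ih =>
    rw [List.foldl_cons, ih]
    by_cases hc : nd ∈ h.2
    · rw [if_pos (List.contains_iff_mem.mpr hc)]
      simp only [PySem.Set.mem_update, List.mem_cons]
      constructor
      · rintro (⟨hx | hx⟩ | ⟨td, htd, h1, h2⟩)
        · exact Or.inl hx
        · exact Or.inr ⟨h, Or.inl rfl, hc, hx⟩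
        · exact Or.inr ⟨td, Or.inr htd, h1, h2⟩
      · rintro (hx | ⟨td, htd | htd, h1, h2⟩)
        · exact Or.inl (Or.inl hx)
        · exact Or.inl (Or.inr (htd ▸ h2))
        · exact Or.inr ⟨td, htd, h1, h2⟩
    · rw [if_neg (fun hcc => hc (List.contains_iff_mem.mp hcc))]
      constructor
      · rintro (hx | ⟨td, htd, h1, h2⟩)
        · exact Or.inl hx
        · exact Or.inr ⟨td, List.mem_cons_of_mem _ htd, h1, h2⟩
      · rintro (hx | ⟨td, htd, h1, h2⟩)
        · exact Or.inl hx
        · rcases List.mem_cons.mp htd with rfl | htd'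
          · exact absurd h1 hc
          · exact Or.inr ⟨td, htd', h1, h2⟩

lemma mem_gather_fold (nd : String) (sm : List (String × List (String × List String))) (acc : PySem.Set String) (x : String) :
    x ∈ sm.foldl (fun acc dt => dt.2.foldl (fun acc2 td => if td.2.contains nd then PySem.Set.update acc2 td.2 else acc2) acc) acc ↔
      x ∈ acc ∨ ∃ dt ∈ sm, ∃ td ∈ dt.2, nd ∈ td.2 ∧ x ∈ td.2 := by
  induction sm generalizing acc with
  | nil => simp
  | cons h t ih =>
    rw [List.foldl_cons, ih, mem_gather_inner]
    constructor
    · rintro (⟨hx | ⟨td, htd, h1, h2⟩⟩ | ⟨dt, hdt, td, htd, h1, h2⟩)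
      · exact Or.inl hx
      · exact Or.inr ⟨h, List.mem_cons_self, td, htd, h1, h2⟩
      · exact Or.inr ⟨dt, List.mem_cons_of_mem _ hdt, td, htd, h1, h2⟩
    · rintro (hx | ⟨dt, hdt, td, htd, h1, h2⟩)
      · exact Or.inl (Or.inl hx)
      · rcases List.mem_cons.mp hdt with rfl | hdt'
        · exact Or.inl (Or.inr ⟨td, htd, h1, h2⟩)
        · exact Or.inr ⟨dt, hdt', td, htd, h1, h2⟩

-- ===== VERDICT (by name: the statement is the Claim_ definition above) =====
theorem has_schedule_conflict_spec : Claim_equal_has_schedule_conflict := by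
  intro cs nd sm _
  show has_schedule_conflict cs nd sm = has_schedule_conflict_alt cs nd sm
  rw [Bool.eq_iff_iff]
  unfold has_schedule_conflict has_schedule_conflict_alt
  simp only [List.any_eq_true, Bool.not_eq_true',
    List.isEmpty_eq_false_iff_exists_mem, PySem.Set.mem_inter, PySem.Set.mem_ofList]
  constructor
  · rintro ⟨dt, hdt, td, htd, hcond⟩
    split_ifs at hcond with hc
    · obtain ⟨d, hd, hdin⟩ := List.any_eq_true.mp hcond
      refine ⟨d, ?_, hd⟩
      unfold hscGather
      rw [mem_gather_fold]
      exact Or.inr ⟨dt, hdt, td, htd, List.contains_iff_mem.mp hc, List.contains_iff_mem.mp hdin⟩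
  · rintro ⟨d, hdg, hdcs⟩
    unfold hscGather at hdg
    rw [mem_gather_fold] at hdg
    rcases hdg with hx | ⟨dt, hdt, td, htd, h1, h2⟩
    · exact absurd hx (List.not_mem_nil)
    · refine ⟨dt, hdt, td, htd, ?_⟩
      rw [if_pos (List.contains_iff_mem.mpr h1)]
      exact List.any_eq_true.mpr ⟨d, hdcs, List.contains_iff_mem.mpr h2⟩
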